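-- pv_equiv track=rewrite | github.com/anamunnoz/SRI-project | src/RWR_Datasets.py | metric_users
-- ===== SOURCE A (Python) =====
-- import copy
--
-- def metric_users(M):
--     '''
--     Select users to evaluate metrics  \n
--     # **Parameters:**
--     - **M:** ratings matrix
--     ### **Returns:** \n
--     - **users:** users for metrics
--     - **m:** matrix for text
--     '''
--     users=[]
--
--     m=copy.deepcopy(M)
--     for i in range(len(M)):
--         for train in M[i][:392]:
--             if train is not None:
--                 for test in M[i][392:]:
--                     if test is not None and test>=3:
--                         if sum([1 for x in M[i][:392] if x is not None]) >4:
--                             users.append(i)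
--                             break
--                 break
--     users=users[:100]
--     for user in users:
--         for j in range(392,len(m[user])):
--             m[user][j]=None
--
--     return users, m
-- ===== SOURCE B (Python) =====
-- def metric_users(M):
--     # One fused left-to-right pass: each row is scanned once with a (count, hit)
--     # accumulator, and both outputs are built together with an early-stop counter
--     # (rows after the 100th selected one are left untouched).
--     users = []
--     m = []
--     for i, row in enumerate(M):
--         cnt, hit = 0, False
--         for j, x in enumerate(row):
--             if x is not None:
--                 if j < 392:
--                     cnt += 1
--                 elif x >= 3:
--                     hit = True
--         if cnt > 4 and hit and len(users) < 100:
--             users.append(i)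
--             m.append(row[:392] + [None] * (len(row) - 392))
--         else:
--             m.append(list(row))
--     return users, m
-- ===== Notes on version B (the rewrite author's own statement) =====
-- stated objective: alternative
-- what changed: Replaces A's staged pipeline (triple-nested break-driven selection over two slices, truncation to 100, then deepcopy with in-place masking of selected rows) with one fused pass that scans each row once with a (count,hit) accumulator and builds the users list and the masked matrix together under an early-stop counter, so no deepcopy, no slicing per predicate, and no second mutation pass exist.
import Mathlib
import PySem

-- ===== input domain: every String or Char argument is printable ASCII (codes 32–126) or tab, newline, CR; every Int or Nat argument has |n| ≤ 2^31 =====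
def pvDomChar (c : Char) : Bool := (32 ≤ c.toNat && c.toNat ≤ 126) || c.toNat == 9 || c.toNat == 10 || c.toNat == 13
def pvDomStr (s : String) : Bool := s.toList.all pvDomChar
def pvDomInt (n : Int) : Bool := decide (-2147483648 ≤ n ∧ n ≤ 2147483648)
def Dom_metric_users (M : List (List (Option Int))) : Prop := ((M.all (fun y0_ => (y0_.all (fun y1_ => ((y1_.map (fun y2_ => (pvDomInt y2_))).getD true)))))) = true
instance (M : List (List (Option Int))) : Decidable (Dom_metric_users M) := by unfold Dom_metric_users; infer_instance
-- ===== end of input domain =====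

-- B replaces A's staged pipeline (break-driven selection over slices, truncate, deepcopy +
-- in-place masking) with ONE fused pass: each row is scanned once with a (count, hit)
-- accumulator and both outputs are built together under an early-stop counter (objective: alternative).

-- ===== PORT A =====
-- sum([1 for x in M[i][:392] if x is not None])
def pvA_cnt (xs : List (Option Int)) : Int :=
  ((xs.filter (fun x => x.isSome)).map (fun _ => (1 : Int))).sum

-- the 'for test in M[i][392:]' loop with its breaks
def pvA_testLoop (tests : List (Option Int)) (trainSlice : List (Option Int)) : Bool :=
  match tests with
  | [] => false
  | t :: rest =>
    match t with
    | some v =>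
      if 3 ≤ v then
        (if 4 < pvA_cnt trainSlice then true else pvA_testLoop rest trainSlice)
      else pvA_testLoop rest trainSlice
    | none => pvA_testLoop rest trainSlice

-- the 'for train in M[i][:392]' loop: on first non-None entry run the test loop, then break
def pvA_trainLoop (train tests trainSlice : List (Option Int)) : Bool :=
  match train with
  | [] => false
  | t :: rest =>
    if t.isSome then pvA_testLoop tests trainSlice else pvA_trainLoop rest tests trainSlice

-- for j in range(392, len(m[user])): m[user][j] = None
def pvA_mask (row : List (Option Int)) : List (Option Int) :=
  (PySem.List.pyRange 392 row.length 1).foldl (fun r j => r.set j.toNat none) row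

def metric_users (M : List (List (Option Int))) : List Int × List (List (Option Int)) :=
  let users : List Int :=
    (PySem.List.pyRange 0 M.length 1).foldl
      (fun users i =>
        let row := PySem.List.pyGetD M i []
        if pvA_trainLoop (row.take 392) (row.drop 392) (row.take 392) then users ++ [i]
        else users) []
  let m := M  -- copy.deepcopy(M)
  let users := users.take 100
  let m := users.foldl (fun mm u => mm.modify u.toNat pvA_mask) m
  (users, m)

-- ===== PORT B =====
-- the inner 'for j, x in enumerate(row)' accumulator pass: (cnt, hit)
def pvB_scan (row : List (Option Int)) : Int × Bool :=
  (PySem.List.enumerate row).foldl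
    (fun s p =>
      match p.2 with
      | none => s
      | some v => if p.1 < 392 then (s.1 + 1, s.2) else if 3 ≤ v then (s.1, true) else s)
    (0, false)

-- row[:392] + [None] * (len(row) - 392)
def pvB_mask (row : List (Option Int)) : List (Option Int) :=
  row.take 392 ++ List.replicate (row.length - 392) none

-- one fused pass building users and m together, with the len(users) < 100 early stop
def metric_users_alt (M : List (List (Option Int))) : List Int × List (List (Option Int)) :=
  (PySem.List.enumerate M).foldl
    (fun um p =>
      let s := pvB_scan p.2
      if 4 < s.1 ∧ s.2 = true ∧ um.1.length < 100 then
        (um.1 ++ [p.1], um.2 ++ [pvB_mask p.2])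
      else (um.1, um.2 ++ [p.2]))
    ([], [])

-- ===== PRECONDITION & SPEC =====
def Spec_metric_users (M : List (List (Option Int))) (out : List Int × List (List (Option Int))) : Prop := out = metric_users_alt M
instance (M : List (List (Option Int))) (out : List Int × List (List (Option Int))) : Decidable (Spec_metric_users M out) := by unfold Spec_metric_users; infer_instance

-- ===== CLAIM (what is proved, stated in full; the proofs are below) =====
def Claim_equal_metric_users : Prop := ∀ (M : List (List (Option Int))), Dom_metric_users M → Spec_metric_users M (metric_users M)

-- ===== LEMMAS AND PROOFS =====

-- canonical middle form both ports are reduced to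
def pvQual (row : List (Option Int)) : Bool :=
  decide (4 < ((row.take 392).filter (fun x => x.isSome)).length) &&
    (row.drop 392).any (fun t => match t with | some v => decide (3 ≤ v) | none => false)

def pvCanonUsers (M : List (List (Option Int))) : List Int :=
  (((PySem.List.enumerate M).filter (fun p => pvQual p.2)).map (fun p => p.1)).take 100

def pvCanon (M : List (List (Option Int))) : List Int × List (List (Option Int)) :=
  (pvCanonUsers M,
   (PySem.List.enumerate M).map (fun p => if (pvCanonUsers M).contains p.1 then pvB_mask p.2 else p.2))

-- ----- A-side lemmas -----

theorem pvA_testLoop_eq (tests s : List (Option Int)) :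
    pvA_testLoop tests s =
      ((tests.any (fun t => match t with | some v => decide (3 ≤ v) | none => false)) &&
        decide (4 < pvA_cnt s)) := by
  induction tests with
  | nil => simp [pvA_testLoop]
  | cons t rest ih =>
    cases t with
    | none => simpa [pvA_testLoop] using ih
    | some v =>
      by_cases h3 : 3 ≤ v
      · by_cases h4 : 4 < pvA_cnt s <;> simp [pvA_testLoop, h3, h4, ih]
      · simp [pvA_testLoop, h3, ih]

theorem pvA_trainLoop_eq (train tests s : List (Option Int)) :
    pvA_trainLoop train tests s = (train.any (fun x => x.isSome) && pvA_testLoop tests s) := by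
  induction train with
  | nil => simp [pvA_trainLoop]
  | cons t rest ih =>
    by_cases h : t.isSome <;> simp [pvA_trainLoop, h, ih]

theorem pvA_cnt_eq (xs : List (Option Int)) :
    pvA_cnt xs = ((xs.filter (fun x => x.isSome)).length : Int) := by
  simp [pvA_cnt]

-- a row qualifies in A iff it qualifies canonically
theorem qual_eq (row : List (Option Int)) :
    pvA_trainLoop (row.take 392) (row.drop 392) (row.take 392) = pvQual row := by
  rw [pvA_trainLoop_eq, pvA_testLoop_eq, pvA_cnt_eq, pvQual]
  by_cases hc : 4 < ((row.take 392).filter (fun x => x.isSome)).length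
  · have hci : (4:Int) < (((row.take 392).filter (fun x => x.isSome)).length : Int) := by
      exact_mod_cast hc
    obtain ⟨x, hx⟩ := List.exists_mem_of_length_pos (by omega : 0 < ((row.take 392).filter (fun x => x.isSome)).length)
    have hne : (row.take 392).any (fun x => x.isSome) = true :=
      List.any_eq_true.mpr ⟨x, List.mem_of_mem_filter hx, List.of_mem_filter hx⟩
    simp [hne, hc, hci]
  · have hci : ¬ ((4:Int) < (((row.take 392).filter (fun x => x.isSome)).length : Int)) := by
      exact_mod_cast hc
    simp [hc, hci]

-- the range(392, len) set-None loop equals take-and-pad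
theorem maskA_fold : ∀ (d k : Nat) (row : List (Option Int)), row.length - k = d →
    (PySem.List.pyRange (k : Int) (row.length : Int) 1).foldl (fun r j => r.set j.toNat none) row
      = row.take k ++ List.replicate (row.length - k) none := by
  intro d
  induction d with
  | zero =>
    intro k row h
    rw [PySem.List.pyRange_one_eq_nil (by exact_mod_cast Nat.le_of_sub_eq_zero h)]
    simp [List.take_of_length_le (by omega : row.length ≤ k), h]
  | succ d ih =>
    intro k row h
    have hk : k < row.length := by omega
    rw [PySem.List.pyRange_one_cons (by exact_mod_cast hk)]
    simp only [List.foldl_cons, Int.toNat_natCast]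
    have hcast : (k : Int) + 1 = ((k + 1 : Nat) : Int) := by push_cast; ring
    have hlen : (row.set k none).length = row.length := by simp
    rw [hcast, ← hlen, ih (k + 1) (row.set k none) (by omega)]
    rw [hlen]
    have h1 : (row.set k none).take (k + 1) = row.take k ++ [none] := by
      rw [List.take_add_one, List.take_set]
      simp [List.set_eq_of_length_le (by simp : (row.take k).length ≤ k), hk]
    have h2 : row.length - k = (row.length - (k + 1)) + 1 := by omega
    rw [h1, h2, List.replicate_succ, List.append_assoc]
    rfl

theorem maskA_eq (row : List (Option Int)) : pvA_mask row = pvB_mask row := by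
  have h := maskA_fold (row.length - 392) 392 row rfl
  simpa [pvA_mask, pvB_mask] using h

-- A's sequence of in-place row mutations, read off element-wise
theorem foldl_modify_getElem? (f : List (Option Int) → List (Option Int)) :
    ∀ (us : List Int) (M : List (List (Option Int))), us.Nodup → (∀ u ∈ us, 0 ≤ u) →
      ∀ (i : Nat),
        (us.foldl (fun mm u => mm.modify u.toNat f) M)[i]?
          = if (i : Int) ∈ us then M[i]?.map f else M[i]? := by
  intro us
  induction us with
  | nil => intro M _ _ i; simp
  | cons u rest ih =>
    intro M hnd hnn i
    simp only [List.foldl_cons]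
    rw [ih (M.modify u.toNat f) hnd.of_cons (fun v hv => hnn v (List.mem_cons_of_mem _ hv)) i]
    have hu0 : 0 ≤ u := hnn u List.mem_cons_self
    have hmod : (M.modify u.toNat f)[i]? = if u.toNat = i then M[i]?.map f else M[i]? := by
      rw [List.getElem?_modify]
      split_ifs with hui
      all_goals cases M[i]? <;> simp
    have hiff : u.toNat = i ↔ u = (i : Int) := by omega
    by_cases hmem : (i : Int) ∈ rest
    · have hne : u ≠ (i : Int) := by
        intro he; exact (List.nodup_cons.mp hnd).1 (he ▸ hmem)
      rw [hmod]
      simp [hmem, hiff, hne]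
    · rw [hmod]
      rw [if_neg hmem]
      by_cases hui : u = (i : Int)
      · rw [if_pos (hiff.mpr hui), if_pos (List.mem_cons.mpr (Or.inl hui.symm))]
      · rw [if_neg (fun h => hui (hiff.mp h)),
          if_neg (by rw [List.mem_cons]; rintro (h | h); exacts [hui h.symm, hmem h])]

-- A equals the canonical form
theorem A_eq_canon (M : List (List (Option Int))) : metric_users M = pvCanon M := by
  unfold metric_users pvCanon
  simp only []
  have husers :
      ((PySem.List.pyRange 0 (M.length : Int) 1).foldl
        (fun users i =>
          let row := PySem.List.pyGetD M i []
          if pvA_trainLoop (row.take 392) (row.drop 392) (row.take 392) then users ++ [i]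
          else users) []).take 100 = pvCanonUsers M := by
    unfold pvCanonUsers
    rw [PySem.List.enumerate_eq_map_pyRange M []]
    rw [List.filter_map, List.map_map]
    rw [PySem.List.foldl_append_if
      (fun i => pvA_trainLoop ((PySem.List.pyGetD M i []).take 392)
        ((PySem.List.pyGetD M i []).drop 392) ((PySem.List.pyGetD M i []).take 392))
      (fun i => i)]
    simp only [List.nil_append]
    rw [List.filter_congr (fun x _ => qual_eq (PySem.List.pyGetD M x []))]
    simp only [Function.comp_def]
    simp
  rw [husers]
  refine Prod.ext rfl ?_
  have hnn : ∀ u ∈ pvCanonUsers M, 0 ≤ u := by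
    intro u hu
    have hu' := List.mem_of_mem_take hu
    obtain ⟨p, hp, rfl⟩ := List.mem_map.mp hu'
    obtain ⟨k, hk, rfl⟩ := (PySem.List.mem_enumerate_iff M 0 p).mp (List.mem_of_mem_filter hp)
    simp
  have hnd : (pvCanonUsers M).Nodup := by
    have hpw : (pvCanonUsers M).Pairwise (· < ·) := by
      refine List.Pairwise.sublist (List.take_sublist _ _) ?_
      rw [List.pairwise_map]
      exact List.Pairwise.filter _ (PySem.List.pairwise_lt_enumerate M 0)
    exact hpw.imp ne_of_lt
  apply List.ext_getElem?
  intro i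
  rw [foldl_modify_getElem? pvA_mask (pvCanonUsers M) M hnd hnn i]
  rw [List.getElem?_map, PySem.List.getElem?_enumerate]
  by_cases hmem : (i : Int) ∈ pvCanonUsers M
  · cases hM : M[i]? <;> simp [hmem, maskA_eq]
  · cases hM : M[i]? <;> simp [hmem]

-- ----- B-side lemmas -----

-- B's single inner scan computes the canonical count and existence flag
theorem scan_fold : ∀ (row : List (Option Int)) (k : Nat) (c : Int) (h : Bool),
    (PySem.List.enumerate row (k : Int)).foldl
      (fun s p =>
        match p.2 with
        | none => s
        | some v => if p.1 < 392 then (s.1 + 1, s.2) else if 3 ≤ v then (s.1, true) else s)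
      (c, h)
    = (c + (((row.take (392 - k)).filter (fun x => x.isSome)).length : Int),
       h || (row.drop (392 - k)).any
              (fun t => match t with | some v => decide (3 ≤ v) | none => false)) := by
  intro row
  induction row with
  | nil => intro k c h; simp [PySem.List.enumerate_nil]
  | cons x rest ih =>
    intro k c h
    rw [PySem.List.enumerate_cons]
    simp only [List.foldl_cons]
    have hk1 : ((k : Int) + 1) = ((k + 1 : Nat) : Int) := by push_cast; ring
    by_cases hk : k < 392
    · have hsub : 392 - k = (392 - (k + 1)) + 1 := by omega
      have hlt : ((k : Int) < 392) := by exact_mod_cast hk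
      cases x with
      | none =>
        simp only [hk1, ih]
        rw [hsub, List.take_succ_cons, List.drop_succ_cons]
        simp
      | some v =>
        simp only [hlt, if_pos, hk1, ih]
        rw [hsub, List.take_succ_cons, List.drop_succ_cons]
        simp only [List.filter_cons, Option.isSome_some, if_pos, List.length_cons,
          Prod.mk.injEq]
        exact ⟨by push_cast; ring, by trivial⟩
    · have hsub0 : 392 - k = 0 := by omega
      have hsub1 : 392 - (k + 1) = 0 := by omega
      have hge : ¬ ((k : Int) < 392) := by exact_mod_cast hk
      cases x with
      | none =>
        simp only [hk1, ih, hsub0, hsub1]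
        simp
      | some v =>
        by_cases h3 : 3 ≤ v
        · simp only [hge, if_pos h3, hk1, ih, hsub0, hsub1]
          simp [h3]
        · simp only [hge, if_neg h3, hk1, ih, hsub0, hsub1]
          simp [h3]

theorem scan_eq (row : List (Option Int)) :
    pvB_scan row
      = ((((row.take 392).filter (fun x => x.isSome)).length : Int),
         (row.drop 392).any (fun t => match t with | some v => decide (3 ≤ v) | none => false)) := by
  have h := scan_fold row 0 0 false
  simpa [pvB_scan, PySem.List.enumerate] using h

-- the fused selection condition matches the canonical qualification
theorem scan_cond_iff (row : List (Option Int)) :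
    (4 < (pvB_scan row).1 ∧ (pvB_scan row).2 = true) ↔ pvQual row = true := by
  rw [scan_eq, pvQual]
  simp only [Bool.and_eq_true, decide_eq_true_eq]
  constructor
  · rintro ⟨h1, h2⟩; exact ⟨by exact_mod_cast h1, h2⟩
  · rintro ⟨h1, h2⟩; exact ⟨by exact_mod_cast h1, h2⟩

-- every canonical user index of M is below M.length
theorem canonUsers_lt (M : List (List (Option Int))) :
    ∀ u ∈ pvCanonUsers M, u < (M.length : Int) := by
  intro u hu
  obtain ⟨p, hp, rfl⟩ := List.mem_map.mp (List.mem_of_mem_take hu)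
  obtain ⟨k, hk, rfl⟩ := (PySem.List.mem_enumerate_iff M 0 p).mp (List.mem_of_mem_filter hp)
  simp only [zero_add]
  exact_mod_cast hk

-- canonical users of M ++ [r]
theorem canonUsers_append (M : List (List (Option Int))) (r : List (Option Int)) :
    pvCanonUsers (M ++ [r])
      = if pvQual r = true ∧ (pvCanonUsers M).length < 100
        then pvCanonUsers M ++ [(M.length : Int)]
        else pvCanonUsers M := by
  have hstep : pvCanonUsers (M ++ [r])
      = ((((PySem.List.enumerate M).filter (fun p => pvQual p.2)).map (fun p => p.1))
          ++ (if pvQual r = true then [((M.length : Nat) : Int)] else [])).take 100 := by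
    unfold pvCanonUsers
    rw [PySem.List.enumerate_append, PySem.List.enumerate_cons, PySem.List.enumerate_nil,
      List.filter_append, List.map_append]
    by_cases hq : pvQual r = true <;> simp [hq]
  have hcanon : pvCanonUsers M
      = ((((PySem.List.enumerate M).filter (fun p => pvQual p.2)).map (fun p => p.1))).take 100 := rfl
  set L := (((PySem.List.enumerate M).filter (fun p => pvQual p.2)).map (fun p => p.1)) with hLdef
  have hlen : (pvCanonUsers M).length = min 100 L.length := by rw [hcanon]; simp
  by_cases hq : pvQual r = true
  · by_cases h100 : L.length < 100
    · rw [if_pos ⟨hq, by omega⟩, hstep, if_pos hq, hcanon]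
      rw [List.take_of_length_le (l := L) (by omega),
        List.take_of_length_le (by simp; omega)]
    · rw [if_neg (by rintro ⟨-, h2⟩; omega), hstep, if_pos hq, hcanon,
        List.take_append_of_le_length (by omega)]
  · rw [if_neg (fun h => hq h.1), hstep, if_neg hq, List.append_nil, hcanon]

-- B equals the canonical form
theorem B_eq_canon (M : List (List (Option Int))) : metric_users_alt M = pvCanon M := by
  induction M using List.reverseRecOn with
  | nil => rfl
  | append_singleton M r ih =>
    unfold metric_users_alt at ih ⊢
    rw [PySem.List.enumerate_append, PySem.List.enumerate_cons, PySem.List.enumerate_nil,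
      List.foldl_append, ih]
    simp only [List.foldl_cons, List.foldl_nil, zero_add]
    unfold pvCanon
    rw [canonUsers_append]
    simp only []
    have hmemlt := canonUsers_lt M
    have hnotmem : ((M.length : Int)) ∉ pvCanonUsers M :=
      fun hm => absurd (hmemlt _ hm) (lt_irrefl _)
    have hmap_stable : ∀ (b : Bool),
        (PySem.List.enumerate M).map
            (fun p => if (pvCanonUsers M ++ if b then [(M.length : Int)] else []).contains p.1
                      then pvB_mask p.2 else p.2)
          = (PySem.List.enumerate M).map
              (fun p => if (pvCanonUsers M).contains p.1 then pvB_mask p.2 else p.2) := by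
      intro b
      apply List.map_congr_left
      intro p hp
      obtain ⟨k, hk, rfl⟩ := (PySem.List.mem_enumerate_iff M 0 p).mp hp
      have hkne : ¬ (k = M.length) := by omega
      cases b
      · simp
      · simp [List.contains_append, hkne]
    by_cases hc : pvQual r = true ∧ (pvCanonUsers M).length < 100
    · rw [if_pos hc]
      have hcond : 4 < (pvB_scan r).1 ∧ (pvB_scan r).2 = true ∧ (pvCanonUsers M).length < 100 := by
        obtain ⟨hq, hl⟩ := hc
        obtain ⟨h1, h2⟩ := (scan_cond_iff r).mpr hq
        exact ⟨h1, h2, hl⟩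
      rw [if_pos hcond]
      refine Prod.ext rfl ?_
      show _ ++ [pvB_mask r] = _
      rw [PySem.List.enumerate_append, PySem.List.enumerate_cons, PySem.List.enumerate_nil,
        List.map_append]
      simp only [zero_add]
      congr 1
      · have h := hmap_stable true
        simpa using h.symm
      · simp
    · rw [if_neg hc]
      have hcond : ¬ (4 < (pvB_scan r).1 ∧ (pvB_scan r).2 = true ∧ (pvCanonUsers M).length < 100) := by
        intro ⟨h1, h2, h3⟩
        exact hc ⟨(scan_cond_iff r).mp ⟨h1, h2⟩, h3⟩
      rw [if_neg hcond]
      refine Prod.ext rfl ?_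
      show _ ++ [r] = _
      rw [PySem.List.enumerate_append, PySem.List.enumerate_cons, PySem.List.enumerate_nil,
        List.map_append]
      simp only [zero_add]
      congr 1
      simp [hnotmem]

-- ===== VERDICT (by name: the statement is the Claim_ definition above) =====
theorem metric_users_spec : Claim_equal_metric_users := by
  intro M _
  show metric_users M = metric_users_alt M
  rw [A_eq_canon, B_eq_canon]
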